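-- pv_equiv track=rewrite | github.com/vigneshA46/PaperTrade_Dhan | bank_nifty_option_buying.py | group_users_by_broker
-- ===== SOURCE A (Python) =====
-- def group_users_by_broker(deployments):
--     grouped = {}
--
--     if not deployments:
--         return grouped
--
--     for d in deployments:
--
--         if d["type"] == "paper":
--             continue
--         broker = d.get("broker_name")
--
--         if not broker:
--             continue
--
--         if broker not in grouped:
--             grouped[broker] = []
--
--         grouped[broker].append(d)
--
--     return grouped
-- ===== SOURCE B (Python) =====
-- def group_users_by_broker(deployments):
--     # Two declarative passes instead of one imperative hash-grouping loop:
--     # filter once, list the distinct brokers in first-occurrence order, then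
--     # collect each broker's members by a per-broker scan of the filtered list.
--     active = [d for d in deployments
--               if d["type"] != "paper" and d.get("broker_name")]
--     brokers = []
--     for d in active:
--         if d["broker_name"] not in brokers:
--             brokers.append(d["broker_name"])
--     return {b: [d for d in active if d["broker_name"] == b] for b in brokers}
-- ===== Notes on version B (the rewrite author's own statement) =====
-- stated objective: alternative
-- what changed: Replaces A's single imperative dict-building loop (conditional skips, key-existence test, in-place append) with a declarative pipeline: filter the active deployments once, list the distinct brokers in first-occurrence order, then build each group by a per-broker scan of the filtered list.
import Mathlib
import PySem

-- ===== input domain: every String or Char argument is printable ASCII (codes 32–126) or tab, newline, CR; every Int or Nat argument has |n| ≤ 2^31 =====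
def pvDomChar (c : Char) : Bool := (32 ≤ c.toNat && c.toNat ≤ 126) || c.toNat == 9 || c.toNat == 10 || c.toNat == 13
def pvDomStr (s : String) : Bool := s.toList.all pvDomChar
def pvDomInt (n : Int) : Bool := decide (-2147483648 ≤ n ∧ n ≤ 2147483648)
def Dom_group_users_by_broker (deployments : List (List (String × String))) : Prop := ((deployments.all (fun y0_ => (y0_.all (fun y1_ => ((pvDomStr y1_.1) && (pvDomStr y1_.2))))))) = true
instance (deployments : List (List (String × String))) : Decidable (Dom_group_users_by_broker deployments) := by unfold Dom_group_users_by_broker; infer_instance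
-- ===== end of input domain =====

-- B groups with two declarative passes (filter, distinct-broker list, per-broker collection)
-- instead of A's single imperative dict-building loop; return values agree whenever A returns.

-- shared helper: d[k] / d.get(k) on an association list (first match, Python-dict lookup)
def pvLook (d : List (String × String)) (k : String) : Option String :=
  match d.find? (fun p => p.1 == k) with
  | some p => some p.2
  | none => none

-- ===== PORT A =====
-- one step of A's for-loop body (d["type"] == KeyError when "type" is missing: that
-- input is excluded by Pre_; the step returns the state unchanged there)
def pvStepA (grouped : List (String × List (List (String × String)))) (d : List (String × String)) :
    List (String × List (List (String × String))) :=
  match pvLook d "type" with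
  | none => grouped                                   -- KeyError: outside Pre_
  | some t =>
    if t == "paper" then grouped
    else
      match pvLook d "broker_name" with
      | none => grouped                               -- broker is None → falsy → continue
      | some broker =>
        if broker == "" then grouped                  -- falsy string → continue
        else
          let grouped :=
            if broker ∈ grouped.map (·.1) then grouped else grouped ++ [(broker, [])]
          grouped.map (fun p => if p.1 == broker then (p.1, p.2 ++ [d]) else p)  -- grouped[broker].append(d)

def group_users_by_broker (deployments : List (List (String × String))) : List (String × List (List (String × String))) :=
  let grouped : List (String × List (List (String × String))) := []
  if deployments = [] then grouped
  else deployments.foldl pvStepA grouped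

-- ===== PORT B =====
-- the comprehension filter of Source B (d["type"] raising KeyError is outside Pre_)
def pvPred (d : List (String × String)) : Bool :=
  match pvLook d "type" with
  | none => false                                     -- KeyError: outside Pre_
  | some t => t != "paper" && ((pvLook d "broker_name").getD "" != "")

def pvBro (d : List (String × String)) : String := (pvLook d "broker_name").getD ""

def group_users_by_broker_alt (deployments : List (List (String × String))) : List (String × List (List (String × String))) :=
  let active := deployments.filter pvPred
  let brokers := active.foldl (fun acc d => if pvBro d ∈ acc then acc else acc ++ [pvBro d]) []
  brokers.map (fun b => (b, active.filter (fun d => pvBro d == b)))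

-- ===== PRECONDITION & SPEC =====
-- A raises KeyError on any deployment without a "type" key; exactly those inputs are excluded.
def Pre_group_users_by_broker (deployments : List (List (String × String))) : Prop :=
  ∀ d ∈ deployments, (d.find? (fun p => p.1 == "type")).isSome = true
instance (deployments : List (List (String × String))) : Decidable (Pre_group_users_by_broker deployments) := by unfold Pre_group_users_by_broker; infer_instance
def pvWitness_group_users_by_broker : (List (List (String × String))) :=
  [[("type", "live"), ("broker_name", "dhan")], [("type", "paper"), ("broker_name", "x")], [("type", "live"), ("broker_name", "")]]

def Spec_group_users_by_broker (deployments : List (List (String × String))) (out : List (String × List (List (String × String)))) : Prop := out = group_users_by_broker_alt deployments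
instance (deployments : List (List (String × String))) (out : List (String × List (List (String × String)))) : Decidable (Spec_group_users_by_broker deployments out) := by unfold Spec_group_users_by_broker; infer_instance

-- ===== CLAIM (what is proved, stated in full; the proofs are below) =====
def Claim_equal_group_users_by_broker : Prop := ∀ (deployments : List (List (String × String))), Dom_group_users_by_broker deployments → Pre_group_users_by_broker deployments → Spec_group_users_by_broker deployments (group_users_by_broker deployments)

-- ===== LEMMAS AND PROOFS =====

-- first-occurrence list of the brokers of ys that are not already in ks
def pvNK (ks : List String) : List (List (String × String)) → List String
  | [] => []
  | d :: ys => if pvBro d ∈ ks then pvNK ks ys else pvBro d :: pvNK (pvBro d :: ks) ys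

theorem pvNK_congr (ks ks' : List String) (ys : List (List (String × String)))
    (h : ∀ a, a ∈ ks ↔ a ∈ ks') : pvNK ks ys = pvNK ks' ys := by
  induction ys generalizing ks ks' with
  | nil => rfl
  | cons d ys ih =>
    simp only [pvNK]
    by_cases hm : pvBro d ∈ ks
    · rw [if_pos hm, if_pos ((h _).mp hm)]; exact ih _ _ h
    · rw [if_neg hm, if_neg (fun hc => hm ((h _).mpr hc))]
      rw [ih (pvBro d :: ks) (pvBro d :: ks') (by intro a; simp [h a])]

theorem pvNK_not_mem (ks : List String) (ys : List (List (String × String)))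
    (b : String) (hb : b ∈ pvNK ks ys) : b ∉ ks := by
  induction ys generalizing ks with
  | nil => simp [pvNK] at hb
  | cons d ys ih =>
    simp only [pvNK] at hb
    by_cases hm : pvBro d ∈ ks
    · rw [if_pos hm] at hb; exact ih ks hb
    · rw [if_neg hm] at hb
      rcases List.mem_cons.mp hb with h | h
      · subst h; exact hm
      · intro hk; exact ih _ h (List.mem_cons_of_mem _ hk)

-- destructure the filter predicate: an active deployment has a non-"paper" type and a broker
theorem pvPred_elim (d : List (String × String)) (hd : pvPred d = true) :
    ∃ t, pvLook d "type" = some t ∧ (t == "paper") = false ∧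
      pvLook d "broker_name" = some (pvBro d) ∧ (pvBro d == "") = false := by
  unfold pvPred pvBro at *
  cases h : pvLook d "type" with
  | none => rw [h] at hd; simp at hd
  | some t =>
    rw [h] at hd
    simp only [Bool.and_eq_true, bne_iff_ne, ne_eq] at hd
    refine ⟨t, rfl, by simp [hd.1], ?_, by simp [hd.2]⟩
    cases hb : pvLook d "broker_name" with
    | none => rw [hb] at hd; simp at hd
    | some b => simp

-- A's loop step when the broker is already a key: append d to its group
theorem pvStepA_mem (g : List (String × List (List (String × String))))
    (d : List (String × String)) (hd : pvPred d = true) (hm : pvBro d ∈ g.map (·.1)) :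
    pvStepA g d = g.map (fun p => if (p.1 == pvBro d) = true then (p.1, p.2 ++ [d]) else p) := by
  obtain ⟨t, ht, hp, hb, hne⟩ := pvPred_elim d hd
  simp [pvStepA, ht, hp, hb, hne, hm]

-- A's loop step on a new broker: the map leaves g alone and a fresh singleton group appears
theorem pvStepA_not_mem (g : List (String × List (List (String × String))))
    (d : List (String × String)) (hd : pvPred d = true) (hm : pvBro d ∉ g.map (·.1)) :
    pvStepA g d = g ++ [(pvBro d, [d])] := by
  obtain ⟨t, ht, hp, hb, hne⟩ := pvPred_elim d hd
  simp only [pvStepA, ht, hp, hb, hne, if_neg hm, Bool.false_eq_true, if_false,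
    List.map_append, List.map_cons, List.map_nil, beq_self_eq_true, if_true]
  congr 1
  · apply (List.map_congr_left ?_).trans (List.map_id g)
    intro p hp'
    have : ¬ (p.1 == pvBro d) = true := by
      simp only [beq_iff_eq]
      intro hc; exact hm (hc ▸ List.mem_map_of_mem hp')
    simp [this]

theorem pvStepA_of_not_pred (g : List (String × List (List (String × String))))
    (d : List (String × String)) (hd : pvPred d = false) : pvStepA g d = g := by
  unfold pvStepA pvPred at *
  cases h : pvLook d "type" with
  | none => rfl
  | some t =>
    rw [h] at hd
    cases hp : (t == "paper") with
    | true => simp [hp]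
    | false =>
      cases hb : pvLook d "broker_name" with
      | none => simp [hp]
      | some b =>
        rw [hb] at hd
        simp only [hp, bne, Bool.not_false, Bool.true_and, Option.getD_some] at hd
        have : b = "" := by simpa using hd
        simp [hp, this]

-- the fold ignores deployments that fail the filter
theorem foldl_stepA_filter (xs : List (List (String × String)))
    (g : List (String × List (List (String × String)))) :
    xs.foldl pvStepA g = (xs.filter pvPred).foldl pvStepA g := by
  induction xs generalizing g with
  | nil => rfl
  | cons d xs ih =>
    simp only [List.foldl_cons, List.filter_cons]
    cases h : pvPred d with
    | true => exact ih _
    | false => rw [pvStepA_of_not_pred _ _ h]; exact ih _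

-- main characterisation of A's grouping fold on an all-active list
theorem foldl_stepA_char (ys : List (List (String × String)))
    (g : List (String × List (List (String × String))))
    (hys : ∀ d ∈ ys, pvPred d = true) :
    ys.foldl pvStepA g =
      g.map (fun p => (p.1, p.2 ++ ys.filter (fun d => pvBro d == p.1)))
        ++ (pvNK (g.map (·.1)) ys).map (fun b => (b, ys.filter (fun d => pvBro d == b))) := by
  induction ys generalizing g with
  | nil => simp [pvNK]
  | cons d ys ih =>
    have hd : pvPred d = true := hys d (by simp)
    have hys' : ∀ e ∈ ys, pvPred e = true := fun e he => hys e (by simp [he])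
    simp only [List.foldl_cons, pvNK]
    by_cases hm : pvBro d ∈ g.map (·.1)
    · rw [if_pos hm, pvStepA_mem g d hd hm, ih _ hys']
      congr 1
      · rw [List.map_map]
        apply List.map_congr_left
        intro p _
        simp only [Function.comp]
        by_cases hp : p.1 = pvBro d
        · simp [hp]
        · have : ¬ (pvBro d == p.1) = true := by
            simp only [beq_iff_eq]; exact fun hc => hp hc.symm
          simp [hp, this]
      · have hkeys : (g.map (fun p => if (p.1 == pvBro d) = true then (p.1, p.2 ++ [d]) else p)).map (·.1) = g.map (·.1) := by
          rw [List.map_map]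
          apply List.map_congr_left
          intro p _
          by_cases hp : p.1 = pvBro d <;> simp [hp]
        rw [hkeys]
        apply List.map_congr_left
        intro b hb
        have hbk := pvNK_not_mem _ _ _ hb
        have : ¬ (pvBro d == b) = true := by
          simp only [beq_iff_eq]
          intro hc; exact hbk (hc ▸ hm)
        congr 1
        simp [this]
    · rw [if_neg hm, pvStepA_not_mem g d hd hm, ih _ hys']
      have hkeys : (g ++ [(pvBro d, [d])]).map (·.1) = g.map (·.1) ++ [pvBro d] := by simp
      rw [hkeys, pvNK_congr (g.map (·.1) ++ [pvBro d]) (pvBro d :: g.map (·.1)) ys (by intro a; simp; tauto)]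
      rw [List.map_append, List.append_assoc]
      congr 1
      · apply List.map_congr_left
        intro p hp
        have hne : p.1 ≠ pvBro d := by
          intro hc; exact hm (hc ▸ List.mem_map_of_mem hp)
        have : ¬ (pvBro d == p.1) = true := by
          simp only [beq_iff_eq]; exact fun hc => hne hc.symm
        congr 1
        simp [this]
      · simp only [List.map_cons, List.map_nil, List.singleton_append]
        congr 1
        · simp
        · apply List.map_congr_left
          intro b hb
          have hbk := pvNK_not_mem _ _ _ hb
          have : ¬ (pvBro d == b) = true := by
            simp only [beq_iff_eq]
            intro hc; exact hbk (by simp [hc])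
          congr 1
          simp [this]

-- B's dedup fold computes pvNK
theorem foldl_dedup_nk (ys : List (List (String × String))) (acc : List String) :
    ys.foldl (fun acc d => if pvBro d ∈ acc then acc else acc ++ [pvBro d]) acc
      = acc ++ pvNK acc ys := by
  induction ys generalizing acc with
  | nil => simp [pvNK]
  | cons d ys ih =>
    simp only [List.foldl_cons, pvNK]
    by_cases hm : pvBro d ∈ acc
    · rw [if_pos hm, if_pos hm]; exact ih acc
    · rw [if_neg hm, if_neg hm, ih (acc ++ [pvBro d])]
      rw [pvNK_congr (acc ++ [pvBro d]) (pvBro d :: acc) ys (by intro a; simp; tauto)]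
      simp

-- ===== VERDICT (by name: the statement is the Claim_ definition above) =====
theorem group_users_by_broker_spec : Claim_equal_group_users_by_broker := by
  intro deployments _ _
  unfold Spec_group_users_by_broker group_users_by_broker group_users_by_broker_alt
  cases deployments with
  | nil => simp
  | cons d0 rest =>
    rw [if_neg (by simp)]
    rw [foldl_stepA_filter]
    rw [foldl_stepA_char _ [] (fun e he => List.of_mem_filter he)]
    simp [foldl_dedup_nk]
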